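-- pv_equiv track=rewrite | github.com/Daria2002/AoC2021 | src/day12.py | small_cave_visited_more_than_once
-- ===== SOURCE A (Python) =====
-- def small_cave_visited_more_than_once(paths):
--     count_dict = {}
--     for path in paths:
--         if path.isupper():
--             continue
--         if path not in count_dict:
--             count_dict[path] = 0
--         count_dict[path] += 1
--         if count_dict[path] > 1:
--             return True
--     return False
-- ===== SOURCE B (Python) =====
-- def small_cave_visited_more_than_once(paths):
--     lower = [p for p in paths if not p.isupper()]
--     return len(set(lower)) != len(lower)
-- ===== Notes on version B (the rewrite author's own statement) =====
-- stated objective: idiomatic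
-- what changed: Replaces the per-element counting dict with early exit by a filter comprehension followed by a set-size vs list-size comparison.
import Mathlib
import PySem

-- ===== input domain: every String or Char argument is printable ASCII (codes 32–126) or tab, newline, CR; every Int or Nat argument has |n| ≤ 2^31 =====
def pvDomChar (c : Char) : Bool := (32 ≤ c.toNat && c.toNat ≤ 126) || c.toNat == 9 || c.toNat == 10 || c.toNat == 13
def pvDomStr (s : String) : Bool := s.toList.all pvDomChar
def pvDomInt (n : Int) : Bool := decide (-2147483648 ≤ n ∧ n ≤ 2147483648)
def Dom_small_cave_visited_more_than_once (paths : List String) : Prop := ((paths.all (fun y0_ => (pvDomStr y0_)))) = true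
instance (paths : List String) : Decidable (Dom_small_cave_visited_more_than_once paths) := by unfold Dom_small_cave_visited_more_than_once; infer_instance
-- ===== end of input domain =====

-- B replaces A's counting dict with early exit by a filter + set-size vs list-size comparison (idiomatic; same cost).

-- s.isupper() for ASCII strings: some cased (= alphabetic) character, and no lowercase one.
-- Exact on the printable-ASCII domain, where the cased characters are exactly the alphabetic ones.
def pyIsupper (s : String) : Bool :=
  s.toList.any (fun c => PySem.Chars.isalpha c) && s.toList.all (fun c => !PySem.Chars.islower c)

-- ===== PORT A =====
def smallCaveGo : PySem.Dict String Int → List String → Bool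
  | _, [] => false
  | d, p :: rest =>
    if pyIsupper p then smallCaveGo d rest
    else
      let d1 := if !(d.contains p) then d.insert p 0 else d
      let d2 := d1.insert p (d1.getD p 0 + 1)
      if d2.getD p 0 > 1 then true else smallCaveGo d2 rest

def small_cave_visited_more_than_once (paths : List String) : Bool :=
  smallCaveGo PySem.Dict.empty paths

-- ===== PORT B =====
def small_cave_visited_more_than_once_alt (paths : List String) : Bool :=
  let lower := paths.filter (fun p => !(pyIsupper p))
  decide (PySem.Set.len (PySem.Set.ofList lower) ≠ (lower.length : Int))

-- ===== PRECONDITION & SPEC =====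
def Spec_small_cave_visited_more_than_once (paths : List String) (out : Bool) : Prop := out = small_cave_visited_more_than_once_alt paths
instance (paths : List String) (out : Bool) : Decidable (Spec_small_cave_visited_more_than_once paths out) := by unfold Spec_small_cave_visited_more_than_once; infer_instance

-- ===== CLAIM (what is proved, stated in full; the proofs are below) =====
def Claim_equal_small_cave_visited_more_than_once : Prop := ∀ (paths : List String), Dom_small_cave_visited_more_than_once paths → Spec_small_cave_visited_more_than_once paths (small_cave_visited_more_than_once paths)

-- ===== LEMMAS AND PROOFS =====

theorem foldl_add_length_le (xs : List String) (s : PySem.Set String) :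
    (xs.foldl PySem.Set.add s).length ≤ s.length + xs.length := by
  induction xs generalizing s with
  | nil => simp
  | cons x xs ih =>
    simp only [List.foldl_cons, List.length_cons]
    have h := ih (PySem.Set.add s x)
    have : (PySem.Set.add s x).length ≤ s.length + 1 := by
      simp only [PySem.Set.add]; split_ifs <;> simp
    omega

theorem nodup_append_singleton (s : List String) (x : String) (hs : s.Nodup) (hx : x ∉ s) :
    (s ++ [x]).Nodup := by
  rw [List.nodup_append]
  refine ⟨hs, List.nodup_singleton x, ?_⟩
  intro a ha b hb hab
  simp only [List.mem_singleton] at hb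
  subst hb
  exact hx (hab ▸ ha)

theorem not_nodup_append_cons (s t : List String) (x : String) (hx : x ∈ s) :
    ¬ (s ++ x :: t).Nodup := by
  intro h
  rw [List.nodup_append] at h
  exact h.2.2 x hx x (by simp) rfl

theorem foldl_add_length_eq_iff (xs : List String) (s : PySem.Set String)
    (hs : s.Nodup) :
    ((xs.foldl PySem.Set.add s).length = s.length + xs.length) ↔ (s ++ xs).Nodup := by
  induction xs generalizing s with
  | nil => simpa using hs
  | cons x xs ih =>
    simp only [List.foldl_cons, PySem.Set.add, PySem.Set.contains]
    by_cases hx : x ∈ s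
    · rw [if_pos (by simpa using hx)]
      constructor
      · intro h
        have := foldl_add_length_le xs s
        simp only [List.length_cons] at h
        omega
      · intro h
        exact absurd h (not_nodup_append_cons s xs x hx)
    · rw [if_neg (by simpa using hx)]
      have hs' : (s ++ [x]).Nodup := nodup_append_singleton s x hs hx
      have h := ih (s ++ [x]) hs'
      simp only [List.length_append, List.length_singleton] at h
      rw [show s.length + (x :: xs).length = s.length + 1 + xs.length by simp only [List.length_cons]; omega, h]
      rw [List.append_assoc]
      simp

theorem smallCaveGo_eq (rest seen : List String) (d : PySem.Dict String Int)
    (hseen : seen.Nodup)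
    (hd : ∀ p, d.getD p 0 = (seen.count p : Int)) :
    smallCaveGo d rest = !decide ((seen ++ rest.filter (fun p => !(pyIsupper p))).Nodup) := by
  induction rest generalizing seen d with
  | nil => simp [smallCaveGo, hseen]
  | cons p rest ih =>
    by_cases hp : pyIsupper p
    · have hfp : (p :: rest).filter (fun p => !(pyIsupper p))
          = rest.filter (fun p => !(pyIsupper p)) := by
        simp [hp]
      rw [hfp]
      simp only [smallCaveGo, if_pos hp]
      exact ih seen d hseen hd
    · have hfp : (p :: rest).filter (fun p => !(pyIsupper p))
          = p :: rest.filter (fun p => !(pyIsupper p)) := by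
        simp [hp]
      rw [hfp]
      have hd1 : ∀ q, ((if !(d.contains p) then d.insert p 0 else d).getD q 0) = (seen.count q : Int) := by
        intro q
        split_ifs with hc
        · by_cases hq : q = p
          · subst hq
            rw [PySem.Dict.getD_insert_self]
            have hz : d.getD q 0 = 0 := by
              rw [PySem.Dict.getD_eq_get?_getD]
              have hn : d.get? q = none := by
                have hco := PySem.Dict.contains_eq_isSome_get? d q
                simp only [Bool.not_eq_true'] at hc
                rw [hc] at hco
                exact Option.not_isSome_iff_eq_none.mp (by simp [← hco])
              simp [hn]
            rw [← hd q, hz]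
          · rw [PySem.Dict.getD_insert_of_ne _ _ _ hq]; exact hd q
        · exact hd q
      simp only [smallCaveGo, if_neg hp]
      rw [PySem.Dict.getD_insert_self, hd1 p]
      by_cases hmem : p ∈ seen
      · have h1 : 1 ≤ seen.count p := List.count_pos_iff.mpr hmem
        rw [if_pos (by exact_mod_cast by omega)]
        have hnd := not_nodup_append_cons seen (rest.filter (fun p => !(pyIsupper p))) p hmem
        simp [hnd]
      · have h0 : seen.count p = 0 := List.count_eq_zero.mpr hmem
        rw [if_neg (by rw [h0]; simp)]
        have hs' : (seen ++ [p]).Nodup := nodup_append_singleton seen p hseen hmem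
        have hd2 : ∀ q, (((if !(d.contains p) then d.insert p 0 else d).insert p ((if !(d.contains p) then d.insert p 0 else d).getD p 0 + 1)).getD q 0) = ((seen ++ [p]).count q : Int) := by
          intro q
          by_cases hq : q = p
          · subst hq
            rw [PySem.Dict.getD_insert_self, hd1 q, h0]
            simp [h0]
          · rw [PySem.Dict.getD_insert_of_ne _ _ _ hq]
            have hz : List.count q [p] = 0 := List.count_eq_zero.mpr (by simp [hq])
            rw [hd1 q]
            simp [List.count_append, hz]
        have hrec := ih (seen ++ [p]) _ hs' hd2
        rw [hd1 p] at hrec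
        rw [List.append_assoc, List.singleton_append] at hrec
        exact hrec

-- ===== VERDICT (by name: the statement is the Claim_ definition above) =====
theorem small_cave_visited_more_than_once_spec : Claim_equal_small_cave_visited_more_than_once := by
  intro paths _
  unfold Spec_small_cave_visited_more_than_once
  unfold small_cave_visited_more_than_once small_cave_visited_more_than_once_alt
  rw [smallCaveGo_eq _ [] PySem.Dict.empty (by simp) (by intro p; simp [PySem.Dict.getD_empty])]
  simp only [List.nil_append, PySem.Set.len, PySem.Set.ofList, PySem.Set.empty]
  set lower := paths.filter (fun p => !(pyIsupper p)) with hl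
  have h := foldl_add_length_eq_iff lower [] (by simp)
  simp only [List.length_nil, List.nil_append, Nat.zero_add] at h
  by_cases hn : lower.Nodup
  · have heq : (lower.foldl PySem.Set.add []).length = lower.length := h.mpr hn
    simp [heq, hn]
  · have hne : (lower.foldl PySem.Set.add []).length ≠ lower.length := fun c => hn (h.mp c)
    simp only [hn, decide_false, Bool.not_false]
    simp [hne]
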